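-- pv_equiv track=rewrite | github.com/LombMarc/personal_finance | webapp/helpers.py | dict_of_list
-- ===== SOURCE A (Python) =====
-- def dict_of_list(list_of_dicts):
--     """
--     From the list of dicitonary arriving from the query result, generate the dictionary of lists as expected by
--     plotly.
--     :param list_of_dicts:
--     :return:
--     """
--     dict_of_lists = {}
--     for d in list_of_dicts:
--         for key, value in d.items():
--             if key in dict_of_lists:
--                 dict_of_lists[key].append(value)
--             else:
--                 dict_of_lists[key] = [value]
--     return dict_of_lists
-- ===== SOURCE B (Python) =====
-- def dict_of_list(list_of_dicts):
--     keys = dict.fromkeys(k for d in list_of_dicts for k in d)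
--     return {k: [d[k] for d in list_of_dicts if k in d] for k in keys}
-- ===== Notes on version B (the rewrite author's own statement) =====
-- stated objective: alternative
-- what changed: Replaces A's row-by-row grouping into a mutable dict with a key-index pass (dict.fromkeys over all keys, preserving first-appearance order) followed by a column-wise comprehension collecting each key's values.
import Mathlib
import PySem

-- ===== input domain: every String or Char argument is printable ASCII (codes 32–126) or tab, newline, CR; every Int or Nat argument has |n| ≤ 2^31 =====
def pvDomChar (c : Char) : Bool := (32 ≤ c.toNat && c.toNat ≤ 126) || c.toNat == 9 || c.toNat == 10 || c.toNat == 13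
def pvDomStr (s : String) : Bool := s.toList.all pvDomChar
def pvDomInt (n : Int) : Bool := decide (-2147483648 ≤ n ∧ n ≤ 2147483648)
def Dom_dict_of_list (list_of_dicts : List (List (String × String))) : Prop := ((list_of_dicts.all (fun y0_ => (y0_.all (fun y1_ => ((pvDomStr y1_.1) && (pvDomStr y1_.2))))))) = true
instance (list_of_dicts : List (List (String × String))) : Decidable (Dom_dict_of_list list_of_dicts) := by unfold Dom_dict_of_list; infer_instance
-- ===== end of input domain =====

-- B replaces A's row-by-row grouping into a mutable dict by a first-appearance key-index pass
-- followed by a column-wise per-key scan (alternative decomposition, same result).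

-- ===== PORT A =====
def dict_of_list (list_of_dicts : List (List (String × String))) : List (String × List String) :=
  (list_of_dicts.foldl (fun acc d =>
      d.foldl (fun acc kv =>
        if acc.contains kv.1 then
          -- dict_of_lists[key].append(value): in-place list append = modify with (· ++ [value])
          acc.modify kv.1 [] (fun vs => vs ++ [kv.2])
        else
          acc.insert kv.1 [kv.2]) acc)
    (PySem.Dict.empty : PySem.Dict String (List String))).items

-- ===== PORT B =====
def dict_of_list_alt (list_of_dicts : List (List (String × String))) : List (String × List String) :=
  -- keys = dict.fromkeys(k for d in list_of_dicts for k in d)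
  let keys := PySem.List.dedup (list_of_dicts.flatMap (fun d => d.map Prod.fst))
  -- {k: [d[k] for d in list_of_dicts if k in d] for k in keys}; 'if k in d' + d[k] = filterMap get?
  keys.map (fun k => (k, list_of_dicts.filterMap (fun d => PySem.Dict.get? (PySem.Dict.mk d) k)))

-- ===== PRECONDITION & SPEC =====
-- Pre_ excludes association lists in which some inner dict has a repeated key: such a list does
-- not represent a Python dict (Python dicts cannot hold duplicate keys), so A is never run on it.
def Pre_dict_of_list (list_of_dicts : List (List (String × String))) : Prop :=
  ∀ d ∈ list_of_dicts, (d.map Prod.fst).Nodup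
instance (list_of_dicts : List (List (String × String))) : Decidable (Pre_dict_of_list list_of_dicts) := by unfold Pre_dict_of_list; infer_instance
def pvWitness_dict_of_list : (List (List (String × String))) :=
  [[("a", "1"), ("b", "2")], [("a", "3")], []]

def Spec_dict_of_list (list_of_dicts : List (List (String × String))) (out : List (String × List String)) : Prop := out = dict_of_list_alt list_of_dicts
instance (list_of_dicts : List (List (String × String))) (out : List (String × List String)) : Decidable (Spec_dict_of_list list_of_dicts out) := by unfold Spec_dict_of_list; infer_instance

-- ===== CLAIM (what is proved, stated in full; the proofs are below) =====
def Claim_equal_dict_of_list : Prop := ∀ (list_of_dicts : List (List (String × String))), Dom_dict_of_list list_of_dicts → Pre_dict_of_list list_of_dicts → Spec_dict_of_list list_of_dicts (dict_of_list list_of_dicts)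

-- ===== LEMMAS AND PROOFS =====

-- A's loop body (if-in-then-append-else-init) is exactly dict.modify with default []
theorem stepA_eq_modify (acc : PySem.Dict String (List String)) (kv : String × String) :
    (if acc.contains kv.1 then acc.modify kv.1 [] (fun vs => vs ++ [kv.2])
     else acc.insert kv.1 [kv.2]) = acc.modify kv.1 [] (fun vs => vs ++ [kv.2]) := by
  by_cases h : acc.contains kv.1
  · simp [h]
  · simp only [h, Bool.false_eq_true, if_false, PySem.Dict.modify]
    rw [PySem.Dict.getD_of_not_contains _ _ (by simpa using h)]
    rfl

-- the nested row loop is a single fold over the flattened pair list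
theorem foldl_foldl {α β : Type} (l : List (List α)) (f : β → α → β) (i : β) :
    l.foldl (fun a d => d.foldl f a) i = (l.flatMap id).foldl f i := by
  induction l generalizing i with
  | nil => rfl
  | cons d t ih => simp [List.flatMap_cons, List.foldl_append, ih]

-- per dict with unique keys: collecting values at key k = the (optional) lookup
theorem filter_eq_get?_toList (d : List (String × String)) (k : String)
    (h : (d.map Prod.fst).Nodup) :
    ((d.filter (fun p => p.1 == k)).map Prod.snd) = (PySem.Dict.get? (PySem.Dict.mk d) k).toList := by
  induction d with
  | nil => rfl
  | cons a t ih =>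
    simp only [List.map_cons, List.nodup_cons] at h
    rw [PySem.Dict.get?_mk_cons]
    by_cases hk : a.1 == k
    · have hkeq : a.1 = k := by simpa using hk
      simp only [List.filter_cons, hk, if_pos, List.map_cons, Option.toList_some]
      have hnil : t.filter (fun p => p.1 == k) = [] := by
        rw [List.filter_eq_nil_iff]
        intro p hp hpk
        have : p.1 = a.1 := by rw [hkeq]; simpa using hpk
        exact h.1 (this ▸ List.mem_map_of_mem hp)
      simp [hnil]
    · simp only [List.filter_cons, hk, Bool.false_eq_true, if_false]
      exact ih h.2

theorem filterMap_eq_flatMap_toList {α β : Type} (l : List α) (f : α → Option β) :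
    l.filterMap f = l.flatMap (fun x => (f x).toList) := by
  induction l with
  | nil => rfl
  | cons a t ih => cases h : f a <;> simp [h, ih]

-- ===== VERDICT (by name: the statement is the Claim_ definition above) =====
theorem dict_of_list_spec : Claim_equal_dict_of_list := by
  intro l _ hpre
  unfold Spec_dict_of_list dict_of_list dict_of_list_alt
  have hstep : (l.foldl (fun acc d =>
      d.foldl (fun acc kv =>
        if acc.contains kv.1 then acc.modify kv.1 [] (fun vs => vs ++ [kv.2])
        else acc.insert kv.1 [kv.2]) acc)
      (PySem.Dict.empty : PySem.Dict String (List String)))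
      = ((l.flatMap id).foldl (fun acc kv => acc.modify kv.1 [] (fun vs => vs ++ [kv.2]))
          (PySem.Dict.empty : PySem.Dict String (List String))) := by
    rw [← foldl_foldl]
    congr 1
    funext acc d
    congr 1
    funext a kv
    exact stepA_eq_modify a kv
  rw [hstep]
  set pairs := l.flatMap id with hpairs
  set D := pairs.foldl (fun acc kv => acc.modify kv.1 [] (fun vs => vs ++ [kv.2]))
      (PySem.Dict.empty : PySem.Dict String (List String)) with hD
  have hnd : D.keys.Nodup := by
    rw [hD]
    exact PySem.Dict.nodup_keys_foldl_modify_key pairs Prod.fst []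
      (fun _ kv => fun vs => vs ++ [kv.2]) _ PySem.Dict.nodup_keys_empty
  have hkeys : D.keys = PySem.List.dedup (l.flatMap (fun d => d.map Prod.fst)) := by
    rw [hD, PySem.Dict.keys_foldl_modify_key]
    simp [PySem.List.dedup_eq_ofList, PySem.Dict.keys_empty, hpairs]
    rfl
  have hgetD : ∀ k, D.getD k [] = l.filterMap (fun d => PySem.Dict.get? (PySem.Dict.mk d) k) := by
    intro k
    rw [hD, PySem.Dict.getD_foldl_modify_append, PySem.Dict.getD_empty]
    rw [hpairs, List.filter_flatMap, List.map_flatMap]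
    rw [filterMap_eq_flatMap_toList]
    simp only [List.nil_append, id]
    apply List.flatMap_congr
    intro d hd
    exact filter_eq_get?_toList d k (hpre d hd)
  rw [PySem.Dict.items_eq_map_keys D hnd []]
  rw [hkeys]
  apply List.map_congr_left
  intro k _
  rw [hgetD k]
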